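-- pv_equiv track=rewrite | github.com/jungyoonoh/AlgorithmPractice | Python/Programmers/KAKAO_TEST/메뉴리뉴얼.py | solution
-- ===== SOURCE A (Python) =====
-- import itertools
-- from collections import defaultdict
--
-- def solution(orders, course):
--     answer = []
--
--     for num in course:
--         orderCnt = defaultdict(int)
--         orderList = []
--         for order in orders:
--             orderList.extend(list(itertools.combinations(sorted(order), num)))
--
--         for element in orderList:
--             s = ''.join(element)
--             orderCnt[s] += 1
--
--         if len(orderCnt) > 0:
--             M = max(list(orderCnt.values()))
--             for s in orderCnt.keys():
--                 if orderCnt[s] == M and orderCnt[s] > 1: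
--                     answer.append(s)
--     answer.sort()
--     return answer
-- ===== SOURCE B (Python) =====
-- import itertools
--
-- def solution(orders, course):
--     sizes = set(course)
--     byLen = {}
--     for order in orders:
--         so = sorted(order)
--         for n in sizes:
--             cnt = byLen.get(n, {})
--             for combo in itertools.combinations(so, n):
--                 key = ''.join(combo)
--                 cnt[key] = cnt.get(key, 0) + 1
--             byLen[n] = cnt
--     answer = []
--     for num in course:
--         cnt = byLen.get(num, {})
--         if cnt:
--             M = max(cnt.values())
--             for s, k in cnt.items():
--                 if k == M and k > 1:
--                     answer.append(s)
--     answer.sort()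
--     return answer
-- ===== Notes on version B (the rewrite author's own statement) =====
-- stated objective: faster
-- what changed: B makes one pass over orders, sorting each order once and building a per-size combination counter dict byLen keyed by the distinct course sizes, then a second pass over course just reads the precomputed counters; A re-sorts every order and re-enumerates all its combinations from scratch for every course entry.
import Mathlib
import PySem

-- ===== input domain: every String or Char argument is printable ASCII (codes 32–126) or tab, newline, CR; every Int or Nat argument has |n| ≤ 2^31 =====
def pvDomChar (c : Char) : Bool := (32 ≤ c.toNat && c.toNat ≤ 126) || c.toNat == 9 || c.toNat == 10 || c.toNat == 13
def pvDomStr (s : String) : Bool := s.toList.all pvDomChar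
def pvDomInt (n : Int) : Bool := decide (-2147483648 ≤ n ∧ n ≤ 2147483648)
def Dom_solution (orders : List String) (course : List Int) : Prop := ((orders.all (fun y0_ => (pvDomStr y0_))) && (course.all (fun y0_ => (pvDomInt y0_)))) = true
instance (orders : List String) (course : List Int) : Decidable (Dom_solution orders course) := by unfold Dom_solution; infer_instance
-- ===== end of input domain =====

-- B groups per-size combination counters in one pass over orders, then reads them per course entry
-- (an alternative decomposition; A rebuilds the counter from scratch for every course entry).

-- ===== PORT A =====
def solution (orders : List String) (course : List Int) : List String :=
  let answer : List String :=
    course.foldl (fun answer num =>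
      -- orderList.extend(list(itertools.combinations(sorted(order), num)))
      let orderList : List (List Char) :=
        orders.foldl (fun acc order =>
          acc ++ PySem.List.combinations (PySem.List.sorted order.toList (fun x => x) false) num.toNat) []
      -- orderCnt[''.join(element)] += 1
      let orderCnt : PySem.Dict String Int :=
        orderList.foldl (fun d element => d.modify (String.ofList element) 0 (· + 1)) PySem.Dict.empty
      if orderCnt.size > 0 then
        match PySem.List.max? orderCnt.values (fun x => x) with
        | some M =>
            orderCnt.keys.foldl (fun ans s =>
              if orderCnt.getD s 0 = M ∧ orderCnt.getD s 0 > 1 then ans ++ [s] else ans) answer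
        | none => answer
      else answer) []
  PySem.List.sorted answer (fun x => x) false

-- ===== PORT B =====
-- inner counting loop of Source B: cnt[key] = cnt.get(key, 0) + 1 over combinations of so of size n
def countCombos (c : PySem.Dict String Int) (so : List Char) (n : Nat) : PySem.Dict String Int :=
  (PySem.List.combinations so n).foldl
    (fun c combo => c.insert (String.ofList combo) (c.getD (String.ofList combo) 0 + 1)) c

def solution_alt (orders : List String) (course : List Int) : List String :=
  let sizes : PySem.Set Int := PySem.Set.ofList course
  let byLen : PySem.Dict Int (PySem.Dict String Int) :=
    orders.foldl (fun byLen order =>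
      let so := PySem.List.sorted order.toList (fun x => x) false
      sizes.foldl (fun byLen n =>
        byLen.insert n (countCombos (byLen.getD n PySem.Dict.empty) so n.toNat)) byLen)
      PySem.Dict.empty
  let answer : List String :=
    course.foldl (fun answer num =>
      let cnt := byLen.getD num PySem.Dict.empty
      if cnt.size > 0 then
        match PySem.List.max? cnt.values (fun x => x) with
        | some M =>
            cnt.items.foldl (fun ans sk =>
              if sk.2 = M ∧ sk.2 > 1 then ans ++ [sk.1] else ans) answer
        | none => answer
      else answer) []
  PySem.List.sorted answer (fun x => x) false

-- ===== PRECONDITION & SPEC =====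
-- Pre_ excludes exactly the inputs on which Python A raises ValueError
-- (a negative size in course reaching itertools.combinations, i.e. orders nonempty); B raises there too.
def Pre_solution (orders : List String) (course : List Int) : Prop :=
  orders = [] ∨ ∀ n ∈ course, 0 ≤ n
instance (orders : List String) (course : List Int) : Decidable (Pre_solution orders course) := by unfold Pre_solution; infer_instance

def pvWitness_solution : List String × List Int := (["abc", "cba", "bc"], [2, 3])

def Spec_solution (orders : List String) (course : List Int) (out : List String) : Prop := out = solution_alt orders course
instance (orders : List String) (course : List Int) (out : List String) : Decidable (Spec_solution orders course out) := by unfold Spec_solution; infer_instance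

-- ===== CLAIM (what is proved, stated in full; the proofs are below) =====
def Claim_equal_solution : Prop := ∀ (orders : List String) (course : List Int), Dom_solution orders course → Pre_solution orders course → Spec_solution orders course (solution orders course)

-- ===== LEMMAS AND PROOFS =====

-- after the inner sizes-loop, the counter stored at a visited key equals countCombos applied to the old one
theorem getD_foldl_insert_step (so : List Char) :
    ∀ (S : List Int) (d : PySem.Dict Int (PySem.Dict String Int)) (num : Int), S.Nodup →
      (S.foldl (fun d n => d.insert n (countCombos (d.getD n PySem.Dict.empty) so n.toNat)) d).getD num PySem.Dict.empty =
        if num ∈ S then countCombos (d.getD num PySem.Dict.empty) so num.toNat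
        else d.getD num PySem.Dict.empty := by
  intro S
  induction S with
  | nil => intro d num _; simp
  | cons n S ih =>
      intro d num hnd
      have hnd' : S.Nodup := (List.nodup_cons.mp hnd).2
      simp only [List.foldl_cons, ih _ _ hnd']
      by_cases hmem : num ∈ S
      · have hne : num ≠ n := fun h => (List.nodup_cons.mp hnd).1 (h ▸ hmem)
        simp [hmem, hne, PySem.Dict.getD_insert]
      · by_cases heq : num = n
        · subst heq
          simp [hmem, PySem.Dict.getD_insert_self]
        · simp [hmem, heq, PySem.Dict.getD_insert]

-- the per-size counter accumulated by B's build equals the sequential count over orders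
theorem getD_byLen (orders : List String) (sizes : List Int) (num : Int)
    (hnd : sizes.Nodup) (hmem : num ∈ sizes) :
    ∀ (d : PySem.Dict Int (PySem.Dict String Int)),
      ((orders.foldl (fun byLen order =>
          sizes.foldl (fun byLen n =>
            byLen.insert n (countCombos (byLen.getD n PySem.Dict.empty)
              (PySem.List.sorted order.toList (fun x => x) false) n.toNat)) byLen) d).getD num PySem.Dict.empty) =
      orders.foldl (fun c order =>
          countCombos c (PySem.List.sorted order.toList (fun x => x) false) num.toNat)
        (d.getD num PySem.Dict.empty) := by
  induction orders with
  | nil => intro d; rfl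
  | cons o os ih =>
      intro d
      simp only [List.foldl_cons, ih]
      rw [getD_foldl_insert_step _ _ _ _ hnd]
      simp [hmem]

-- folding a counting step over a flatMap is the nested fold
theorem foldl_flatMap_eq {α β γ : Type} (f : γ → β → γ) (L : α → List β) :
    ∀ (xs : List α) (c : γ), (xs.flatMap L).foldl f c = xs.foldl (fun c x => (L x).foldl f c) c := by
  intro xs
  induction xs with
  | nil => intro c; rfl
  | cons x xs ih => intro c; simp [List.flatMap_cons, List.foldl_append, ih]

-- B's insert-style counting step is A's modify-style step
theorem countCombos_eq_modify (c : PySem.Dict String Int) (so : List Char) (n : Nat) :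
    countCombos c so n =
      (PySem.List.combinations so n).foldl (fun d e => d.modify (String.ofList e) 0 (· + 1)) c := rfl

-- the per-num counter both ports work with
def numCnt (orders : List String) (num : Int) : PySem.Dict String Int :=
  ((orders.flatMap (fun o =>
      PySem.List.combinations (PySem.List.sorted o.toList (fun x => x) false) num.toNat)).map
        String.ofList).foldl (fun d s => d.modify s 0 (· + 1)) PySem.Dict.empty

theorem nodup_keys_numCnt (orders : List String) (num : Int) : (numCnt orders num).keys.Nodup := by
  have : numCnt orders num = PySem.Dict.counter
      ((orders.flatMap (fun o =>
        PySem.List.combinations (PySem.List.sorted o.toList (fun x => x) false) num.toNat)).map String.ofList) := by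
    rw [PySem.Dict.counter_eq_foldl]; rfl
  rw [this]; exact PySem.Dict.nodup_keys_counter _

-- A's per-num counter is numCnt
theorem orderCnt_eq (orders : List String) (num : Int) :
    ((orders.foldl (fun acc order =>
        acc ++ PySem.List.combinations (PySem.List.sorted order.toList (fun x => x) false) num.toNat) []).foldl
      (fun d element => d.modify (String.ofList element) 0 (· + 1)) PySem.Dict.empty) = numCnt orders num := by
  rw [PySem.List.foldl_append_eq_flatMap, List.nil_append, numCnt, List.foldl_map]

-- B's per-num counter is numCnt too
theorem byLen_getD_eq (orders : List String) (course : List Int) (num : Int) (hmem : num ∈ course) :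
    ((orders.foldl (fun byLen order =>
        (PySem.Set.ofList course).foldl (fun byLen n =>
          byLen.insert n (countCombos (byLen.getD n PySem.Dict.empty)
            (PySem.List.sorted order.toList (fun x => x) false) n.toNat)) byLen)
      (PySem.Dict.empty : PySem.Dict Int (PySem.Dict String Int))).getD num PySem.Dict.empty) =
    numCnt orders num := by
  rw [getD_byLen orders (PySem.Set.ofList course) num (PySem.Set.nodup_ofList course)
        ((PySem.Set.mem_ofList course num).mpr hmem)]
  rw [numCnt, List.foldl_map, foldl_flatMap_eq]
  simp only [PySem.Dict.getD_empty]
  apply PySem.List.foldl_congr_mem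
  intro c o _
  exact countCombos_eq_modify c _ _

-- B's items-selection loop over a Nodup-keys dict is A's keys-selection loop
theorem items_foldl_eq_keys_foldl (d : PySem.Dict String Int) (hnd : d.keys.Nodup) (M : Int) (ans : List String) :
    d.items.foldl (fun ans sk => if sk.2 = M ∧ sk.2 > 1 then ans ++ [sk.1] else ans) ans =
    d.keys.foldl (fun ans s => if d.getD s 0 = M ∧ d.getD s 0 > 1 then ans ++ [s] else ans) ans := by
  rw [PySem.Dict.items_eq_map_keys d hnd 0, List.foldl_map]

-- ===== VERDICT (by name: the statement is the Claim_ definition above) =====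
theorem solution_spec : Claim_equal_solution := by
  intro orders course _ _
  unfold Spec_solution solution solution_alt
  simp only []
  congr 1
  apply PySem.List.foldl_congr_mem
  intro ans num hmem
  rw [orderCnt_eq, byLen_getD_eq orders course num hmem]
  by_cases hsz : (numCnt orders num).size > 0
  · simp only [if_pos hsz]
    cases hM : PySem.List.max? (numCnt orders num).values (fun x => x) with
    | none => rfl
    | some M => exact (items_foldl_eq_keys_foldl _ (nodup_keys_numCnt orders num) M ans).symm
  · simp only [if_neg hsz]
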